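-- pv_equiv track=rewrite | github.com/GabrielRioo/SantanderDataChallenge | maps.py | convert_list2polygons
-- ===== SOURCE A (Python) =====
-- def convert_list2polygons(list_lines):
--     keys = []
--     polygons = []
--     k = 0
--     while(k < len(list_lines)):
--         poly = []
--         inner_flag = True
--         if k == 0:
--             line = list_lines[k]
--             keys.append(line[0])
--             k += 1
--         while(inner_flag and k < len(list_lines)):
--             line = list_lines[k]
--             k += 1
--             if len(line) > 1:
--                 poly.append(line)
--             else:
--                 inner_flag = False
--                 keys.append(line[0])
--         k+= 1
--         polygons.append(poly)
--     return keys, polygons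
-- ===== SOURCE B (Python) =====
-- def convert_list2polygons(list_lines):
--     # Two-phase slicing: find the next separator with a scan, cut the polygon
--     # group out as a slice, then restart on the suffix after the skipped line.
--     if not list_lines:
--         return [], []
--     keys = [list_lines[0][0]]
--     polygons = []
--     rest = list_lines[1:]
--     while True:
--         sep = next((i for i, l in enumerate(rest) if len(l) <= 1), None)
--         if sep is None:
--             polygons.append(rest)
--             break
--         polygons.append(rest[:sep])
--         keys.append(rest[sep][0])
--         if len(rest) - sep <= 2:
--             break
--         rest = rest[sep + 2:]
--     return keys, polygons
-- ===== Notes on version B (the rewrite author's own statement) =====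
-- stated objective: alternative
-- what changed: Replaces A's single stateful nested while-loop (flag + element-by-element poly accumulation over a shared index k) with a two-phase scan-and-slice: repeatedly find the next separator index, emit the whole group as one slice, and restart on the suffix after the skipped line.
import Mathlib
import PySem

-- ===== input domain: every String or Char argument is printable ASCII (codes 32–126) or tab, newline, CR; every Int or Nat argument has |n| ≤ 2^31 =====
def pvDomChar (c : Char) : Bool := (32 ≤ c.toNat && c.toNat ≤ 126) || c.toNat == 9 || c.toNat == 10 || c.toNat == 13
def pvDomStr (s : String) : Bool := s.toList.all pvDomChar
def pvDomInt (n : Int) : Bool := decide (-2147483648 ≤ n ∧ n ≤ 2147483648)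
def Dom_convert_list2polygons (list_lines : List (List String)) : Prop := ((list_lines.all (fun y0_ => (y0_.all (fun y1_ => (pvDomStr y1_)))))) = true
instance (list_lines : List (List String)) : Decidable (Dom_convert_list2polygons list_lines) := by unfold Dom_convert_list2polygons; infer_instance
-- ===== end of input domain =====

-- B replaces A's stateful nested while-loop with a scan-for-separator-then-slice
-- two-phase pass (objective: alternative decomposition; same results, no speed claim).

-- ===== PORT A =====
-- A's inner while-loop: scans from index k, accumulating poly while len(line) > 1;
-- on a separator (len ≤ 1) appends line[0] to keys and stops (inner_flag = False),
-- returning the Python state (k, poly, keys).  The fuel argument (passed in as the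
-- number of remaining indices) only makes the recursion structural; line[0] is
-- headD "" — Python raises IndexError on an empty inspected line, and exactly
-- those inputs are outside Pre_.
def pvA_inner (lines : List (List String)) :
    Nat → Nat → List (List String) → List String → Nat × List (List String) × List String
  | 0, k, poly, keys => (k, poly, keys)
  | fuel + 1, k, poly, keys =>
    if h : k < lines.length then
      let line := lines[k]
      if line.length > 1 then
        pvA_inner lines fuel (k + 1) (poly ++ [line]) keys
      else
        (k + 1, poly, keys ++ [line.headD ""])
    else (k, poly, keys)

-- A's outer while-loop: header key at k = 0, then one inner run per iteration,
-- the extra k += 1 (the skip), and polygons.append(poly); fuel only bounds the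
-- number of outer iterations (k strictly grows, so lines.length + 1 is enough).
def pvA_outer (lines : List (List String)) :
    Nat → Nat → List String → List (List (List String)) → List String × List (List (List String))
  | 0, _, keys, polygons => (keys, polygons)
  | fuel + 1, k, keys, polygons =>
    if _h : k < lines.length then
      if _hk : k = 0 then
        let keys1 := keys ++ [(lines.headD []).headD ""]
        let r := pvA_inner lines (lines.length - 1) 1 [] keys1
        pvA_outer lines fuel (r.1 + 1) r.2.2 (polygons ++ [r.2.1])
      else
        let r := pvA_inner lines (lines.length - k) k [] keys
        pvA_outer lines fuel (r.1 + 1) r.2.2 (polygons ++ [r.2.1])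
    else (keys, polygons)

def convert_list2polygons (list_lines : List (List String)) :
    List String × List (List (List String)) :=
  pvA_outer list_lines (list_lines.length + 1) 0 [] []

-- ===== PORT B =====
-- B's loop: find the next separator index, emit the group rest[:sep] as a slice,
-- append rest[sep][0] to keys, stop if nothing follows the skipped line, else
-- continue on rest[sep+2:]; fuel only bounds the iterations (rest strictly
-- shrinks, so rest.length + 1 is enough).
def pvB_go :
    Nat → List (List String) → List String → List (List (List String)) → List String × List (List (List String))
  | 0, _, keys, polygons => (keys, polygons)
  | fuel + 1, rest, keys, polygons =>
    match rest.findIdx? (fun l => decide (l.length ≤ 1)) with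
    | none => (keys, polygons ++ [rest])
    | some s =>
      let keys1 := keys ++ [((rest.drop s).headD []).headD ""]
      let polygons1 := polygons ++ [rest.take s]
      if rest.length - s ≤ 2 then (keys1, polygons1)
      else pvB_go fuel (rest.drop (s + 2)) keys1 polygons1

def convert_list2polygons_alt (list_lines : List (List String)) :
    List String × List (List (List String)) :=
  match list_lines with
  | [] => ([], [])
  | l0 :: rest => pvB_go (rest.length + 1) rest [l0.headD ""] []

-- ===== PRECONDITION & SPEC =====
-- Pre_ excludes exactly the inputs on which A raises (IndexError at line[0] on an
-- empty line it inspects): the header line must be nonempty, and an empty line may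
-- occur later only in a skipped position, i.e. immediately after a separator.
-- The fold carries (skipped?, ok-so-far): a non-skipped line must be nonempty,
-- and the next position is skipped iff this one is a separator (non-skipped, len ≤ 1).
-- Pre_ admits every input A returns on.
def Pre_convert_list2polygons (list_lines : List (List String)) : Prop :=
  list_lines = [] ∨ (list_lines.headD [] ≠ [] ∧
    (list_lines.tail.foldl
      (fun st l => (!st.1 && decide (l.length ≤ 1), st.2 && (st.1 || !l.isEmpty)))
      (false, true)).2 = true)
instance (list_lines : List (List String)) : Decidable (Pre_convert_list2polygons list_lines) := by
  unfold Pre_convert_list2polygons; infer_instance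

def pvWitness_convert_list2polygons : List (List String) :=
  [["h"], ["a", "b"], ["s"], ["c", "d"]]

def Spec_convert_list2polygons (list_lines : List (List String)) (out : List String × List (List (List String))) : Prop := out = convert_list2polygons_alt list_lines
instance (list_lines : List (List String)) (out : List String × List (List (List String))) : Decidable (Spec_convert_list2polygons list_lines out) := by unfold Spec_convert_list2polygons; infer_instance

-- ===== CLAIM (what is proved, stated in full; the proofs are below) =====
def Claim_equal_convert_list2polygons : Prop := ∀ (list_lines : List (List String)), Dom_convert_list2polygons list_lines → Pre_convert_list2polygons list_lines → Spec_convert_list2polygons list_lines (convert_list2polygons list_lines)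

-- ===== LEMMAS AND PROOFS =====

theorem pvB_findIdx?_lt {α : Type} (l : List α) (p : α → Bool) (s : Nat)
    (h : l.findIdx? p = some s) : s < l.length :=
  (List.findIdx?_eq_some_iff_findIdx_eq.mp h).1

-- with the scan position past the end, A's outer loop stops whatever the fuel
theorem pvA_outer_stop (lines : List (List String)) (fo k : Nat) (keys : List String)
    (polygons : List (List (List String))) (h : ¬ k < lines.length) :
    pvA_outer lines fo k keys polygons = (keys, polygons) := by
  cases fo <;> simp [pvA_outer, h]

-- Characterisation of A's inner loop in terms of findIdx? on the suffix.
theorem pvA_inner_spec (lines : List (List String)) :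
    ∀ (fuel k : Nat) (poly : List (List String)) (keys : List String),
      lines.length - k ≤ fuel → k ≤ lines.length →
      pvA_inner lines fuel k poly keys =
        match (lines.drop k).findIdx? (fun l => decide (l.length ≤ 1)) with
        | none => (lines.length, poly ++ lines.drop k, keys)
        | some s => (k + s + 1, poly ++ (lines.drop k).take s,
            keys ++ [((lines.drop (k + s)).headD []).headD ""]) := by
  intro fuel
  induction fuel with
  | zero =>
    intro k poly keys hm hk
    have hkl : k = lines.length := by omega
    subst hkl
    rw [List.drop_length, List.findIdx?_nil]
    simp [pvA_inner]
  | succ fuel ih =>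
    intro k poly keys hm hk
    by_cases h : k < lines.length
    · have hdrop : lines.drop k = lines[k] :: lines.drop (k + 1) :=
        List.drop_eq_getElem_cons h
      rw [pvA_inner]
      simp only [h, dif_pos]
      by_cases hl : lines[k].length > 1
      · rw [if_pos hl]
        rw [ih (k + 1) (poly ++ [lines[k]]) keys (by omega) (by omega)]
        rw [hdrop, List.findIdx?_cons]
        rw [if_neg (by simp; omega)]
        cases hfi : (lines.drop (k + 1)).findIdx? (fun l => decide (l.length ≤ 1)) with
        | none =>
          simp
        | some s' =>
          simp only [Option.map_some]
          have e1 : k + (s' + 1) + 1 = k + 1 + s' + 1 := by omega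
          have e2 : k + (s' + 1) = k + 1 + s' := by omega
          rw [e1, e2, List.take_succ_cons]
          simp
      · rw [if_neg hl]
        rw [hdrop, List.findIdx?_cons]
        rw [if_pos (by simp; omega)]
        simp only [Nat.add_zero, List.take_zero, List.append_nil, hdrop, List.headD_cons]
    · have hkl : k = lines.length := by omega
      subst hkl
      rw [List.drop_length, List.findIdx?_nil]
      simp [pvA_inner]

-- One outer iteration of A (inner run + skip + append) equals one pvB_go step.
theorem pvA_outer_eq_pvB_go (lines : List (List String)) :
    ∀ (fo fb k : Nat) (keys : List String) (polygons : List (List (List String))),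
      lines.length - k < fo → lines.length - k < fb → 1 ≤ k → k ≤ lines.length →
      (let r := pvA_inner lines (lines.length - k) k [] keys
       pvA_outer lines fo (r.1 + 1) r.2.2 (polygons ++ [r.2.1]))
      = pvB_go fb (lines.drop k) keys polygons := by
  intro fo
  induction fo with
  | zero => intro fb k keys polygons h1; omega
  | succ fo ih =>
    intro fb k keys polygons h1 h2 h3 h4
    cases fb with
    | zero => omega
    | succ fb =>
      rw [pvA_inner_spec lines (lines.length - k) k [] keys (by omega) h4]
      rw [pvB_go]
      cases hfi : (lines.drop k).findIdx? (fun l => decide (l.length ≤ 1)) with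
      | none =>
        simp only
        rw [pvA_outer_stop lines (fo + 1) (lines.length + 1) keys _ (by omega)]
        simp
      | some s =>
        have hs : s < (lines.drop k).length := pvB_findIdx?_lt _ _ _ hfi
        simp only [List.length_drop] at hs
        simp only
        have hdd : (lines.drop k).drop s = lines.drop (k + s) := by
          rw [List.drop_drop]
        by_cases hend : lines.length - k - s ≤ 2
        · rw [if_pos (by simp only [List.length_drop]; omega)]
          rw [hdd, pvA_outer_stop lines (fo + 1) (k + s + 1 + 1) _ _ (by omega)]
          simp
        · rw [if_neg (by simp only [List.length_drop]; omega)]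
          have hlt : k + s + 1 + 1 < lines.length := by omega
          have e3 : k + (s + 2) = k + s + 2 := by omega
          have hdd2 : (lines.drop k).drop (s + 2) = lines.drop (k + s + 2) := by
            rw [List.drop_drop, e3]
          rw [hdd, hdd2, pvA_outer]
          have hih := ih fb (k + s + 2) (keys ++ [((lines.drop (k + s)).headD []).headD ""])
            (polygons ++ [(lines.drop k).take s]) (by omega) (by omega) (by omega) (by omega)
          simp only at hih
          have harg : k + s + 1 + 1 = k + s + 2 := by omega
          rw [harg] at hlt ⊢
          simp only [hlt, dif_pos, dif_neg (by omega : ¬ k + s + 2 = 0)]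
          exact hih

-- ===== VERDICT (by name: the statement is the Claim_ definition above) =====
theorem convert_list2polygons_spec : Claim_equal_convert_list2polygons := by
  intro lines _ _
  unfold Spec_convert_list2polygons convert_list2polygons convert_list2polygons_alt
  cases lines with
  | nil => simp [pvA_outer]
  | cons l0 rest =>
    rw [pvA_outer]
    have h0 : 0 < (l0 :: rest).length := by simp
    simp only [h0, dif_pos]
    have hmain := pvA_outer_eq_pvB_go (l0 :: rest) ((l0 :: rest).length) (rest.length + 1) 1
      ([] ++ [((l0 :: rest).headD []).headD ""]) [] (by simp) (by simp) (by omega) (by simp)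
    simp only at hmain
    simpa using hmain
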